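-- pv_equiv track=rewrite | github.com/caMelodian/CloudFormation-Template | python/spy/task.py | solution
-- ===== SOURCE A (Python) =====
-- def solution(ability, number):
--     if number == 0:
--         return sum(ability)
--
--     ability.sort()
--     stat = ability[0] + ability[1]
--     ability[0] = stat
--     ability[1] = stat
--
--     return solution(ability, number - 1)
-- ===== SOURCE B (Python) =====
-- def _insort(lst, x):
--     # insert x into the sorted list lst, keeping it sorted (linear scan)
--     i = 0
--     while i < len(lst) and lst[i] < x:
--         i += 1
--     lst.insert(i, x)
--
--
-- def solution(ability, number):
--     # keep one sorted working list instead of re-sorting every iteration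
--     heap = sorted(ability)
--     for _ in range(number):
--         s = heap[0] + heap[1]
--         del heap[:2]
--         _insort(heap, s)
--         _insort(heap, s)
--     return sum(heap)
-- ===== Notes on version B (the rewrite author's own statement) =====
-- stated objective: alternative
-- what changed: B sorts once and then maintains the sorted working list by ordered insertion of the merged value (pop two smallest, insert their sum twice), instead of A's re-sorting the whole list on every recursive call; B iterates instead of recursing and does not mutate the argument (measured much faster at mid sizes, but unconfirmed at the largest, so no speed claim).
import Mathlib
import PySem

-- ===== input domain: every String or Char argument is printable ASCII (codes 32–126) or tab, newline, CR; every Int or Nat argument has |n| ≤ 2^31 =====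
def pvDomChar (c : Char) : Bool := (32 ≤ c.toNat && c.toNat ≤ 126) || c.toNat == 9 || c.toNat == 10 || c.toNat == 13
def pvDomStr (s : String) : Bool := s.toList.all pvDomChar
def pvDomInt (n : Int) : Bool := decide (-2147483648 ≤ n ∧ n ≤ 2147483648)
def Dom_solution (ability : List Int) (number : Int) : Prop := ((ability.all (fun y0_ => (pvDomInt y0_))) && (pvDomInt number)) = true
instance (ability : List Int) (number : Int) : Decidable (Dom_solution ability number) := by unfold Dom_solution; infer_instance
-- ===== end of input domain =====

-- B sorts once and maintains the sorted list by ordered insertion instead of re-sorting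
-- on every iteration; equivalence is about the RETURN value only: A sorts/overwrites
-- `ability` in place, B leaves it untouched.

-- ===== PORT A =====
-- the recursion `solution(ability, number-1)` runs number.toNat times (Pre_ has 0 ≤ number)
def solutionGo (ability : List Int) (fuel : Nat) : Int :=
  match fuel with
  | 0 => ability.sum                                  -- sum(ability)
  | n + 1 =>
    let srt := PySem.List.sorted ability (fun x => x) false   -- ability.sort()
    match PySem.List.pyGet? srt 0, PySem.List.pyGet? srt 1 with
    | some a0, some a1 =>
      let stat := a0 + a1                             -- stat = ability[0] + ability[1]
      solutionGo ((srt.set 0 stat).set 1 stat) n      -- ability[0] = stat; ability[1] = stat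
    | _, _ => 0                                       -- IndexError in Python; outside Pre_

def solution (ability : List Int) (number : Int) : Int :=
  solutionGo ability number.toNat

-- ===== PORT B =====
-- _insort: the linear scan `while i < len and lst[i] < x` + insert is exactly orderedInsert (· ≤ ·)
-- loop body: s = heap[0] + heap[1]; del heap[:2]; _insort s; _insort s — run range(number) times
def solutionAltGo (heap : List Int) (fuel : Nat) : List Int :=
  match fuel with
  | 0 => heap
  | n + 1 =>
    match heap with
    | a :: b :: t =>
      solutionAltGo (List.orderedInsert (· ≤ ·) (a + b) (List.orderedInsert (· ≤ ·) (a + b) t)) n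
    | _ => heap                                       -- IndexError in Python; outside Pre_

def solution_alt (ability : List Int) (number : Int) : Int :=
  (solutionAltGo (PySem.List.sorted ability (fun x => x) false) number.toNat).sum

-- ===== PRECONDITION & SPEC =====
-- A raises IndexError when number ≠ 0 and the list has fewer than two elements, and
-- RecursionError when number < 0; Pre_ excludes exactly those inputs.
def Pre_solution (ability : List Int) (number : Int) : Prop :=
  0 ≤ number ∧ (number = 0 ∨ 2 ≤ ability.length)
instance (ability : List Int) (number : Int) : Decidable (Pre_solution ability number) := by
  unfold Pre_solution; infer_instance

def pvWitness_solution : List Int × Int := ([3, 1, 2], 2)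

def Spec_solution (ability : List Int) (number : Int) (out : Int) : Prop := out = solution_alt ability number
instance (ability : List Int) (number : Int) (out : Int) : Decidable (Spec_solution ability number out) := by unfold Spec_solution; infer_instance

-- ===== CLAIM (what is proved, stated in full; the proofs are below) =====
def Claim_equal_solution : Prop := ∀ (ability : List Int) (number : Int), Dom_solution ability number → Pre_solution ability number → Spec_solution ability number (solution ability number)

-- ===== LEMMAS AND PROOFS =====

theorem oi_perm (x : Int) (l : List Int) :
    (List.orderedInsert (· ≤ ·) x l).Perm (x :: l) :=
  List.perm_orderedInsert _ _ _

theorem oi_sorted (x : Int) (l : List Int) (h : l.Pairwise (· ≤ ·)) :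
    (List.orderedInsert (· ≤ ·) x l).Pairwise (· ≤ ·) :=
  List.Pairwise.orderedInsert x l h

-- the insorted pair is the sorted version of s :: s :: t when t is sorted
theorem oi_oi_eq_sorted (s : Int) (t : List Int) (ht : t.Pairwise (· ≤ ·)) :
    PySem.List.sorted (s :: s :: t) (fun x => x) false =
      List.orderedInsert (· ≤ ·) s (List.orderedInsert (· ≤ ·) s t) := by
  apply PySem.List.sorted_id_eq_of_perm_of_pairwise
  · exact ((oi_perm s _).trans ((oi_perm s t).cons s)).trans (List.Perm.swap s s t)
  · exact oi_sorted s _ (oi_sorted s t ht)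

theorem pyGet_cons2_zero (a b : Int) (t : List Int) :
    PySem.List.pyGet? (a :: b :: t) 0 = some a := by
  have h : (0:Int) ≤ (t.length:Int) + 1 := by positivity
  simp [PySem.List.pyGet?, PySem.List.pyIdx?, h]

theorem pyGet_cons2_one (a b : Int) (t : List Int) :
    PySem.List.pyGet? (a :: b :: t) 1 = some b := by
  have h : (1:Int) < (t.length:Int) + 1 + 1 := by omega
  simp [PySem.List.pyGet?, PySem.List.pyIdx?, h]

theorem main_lemma (n : Nat) : ∀ (l : List Int), (n = 0 ∨ 2 ≤ l.length) →
    solutionGo l n = (solutionAltGo (PySem.List.sorted l (fun x => x) false) n).sum := by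
  induction n with
  | zero =>
    intro l _
    simp [solutionGo, solutionAltGo]
    exact ((PySem.List.sorted_perm l (fun x => x) false).sum_eq).symm
  | succ n ih =>
    intro l hl
    have hlen : 2 ≤ (PySem.List.sorted l (fun x => x) false).length := by
      rw [PySem.List.length_sorted]; omega
    obtain ⟨a, b, t, hs⟩ : ∃ a b t, PySem.List.sorted l (fun x => x) false = a :: b :: t := by
      match h : PySem.List.sorted l (fun x => x) false with
      | [] => rw [h] at hlen; simp at hlen
      | [a] => rw [h] at hlen; simp at hlen
      | a :: b :: t => exact ⟨a, b, t, rfl⟩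
    have ht : t.Pairwise (fun a b : Int => a ≤ b) := by
      have := PySem.List.sorted_pairwise l (fun x => x) (κ := Int)
      rw [hs] at this
      exact (List.pairwise_cons.mp (List.pairwise_cons.mp this).2).2
    have hA : solutionGo l (n + 1) = solutionGo ((a + b) :: (a + b) :: t) n := by
      rw [solutionGo, hs, pyGet_cons2_zero, pyGet_cons2_one]
      simp only [List.set_cons_zero, List.set_cons_succ]
    have hB : solutionAltGo (PySem.List.sorted l (fun x => x) false) (n + 1) =
        solutionAltGo (List.orderedInsert (· ≤ ·) (a + b) (List.orderedInsert (· ≤ ·) (a + b) t)) n := by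
      rw [hs]; rfl
    rw [hA, hB, ih ((a + b) :: (a + b) :: t) (by right; simp), oi_oi_eq_sorted (a + b) t ht]

-- ===== VERDICT (by name: the statement is the Claim_ definition above) =====
theorem solution_spec : Claim_equal_solution := by
  intro ability number _ hpre
  unfold Spec_solution solution solution_alt
  rcases hpre with ⟨hn, h2⟩
  apply main_lemma
  rcases h2 with h0 | h2
  · left; simp [h0]
  · right; exact h2
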